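-- pv_equiv track=rewrite | github.com/SharmaSimm/Restaurant-Menu | Program3_3.py | find_closest_feasible_n
-- ===== SOURCE A (Python) =====
-- def find_nuggets_combination(n):
--     total_nuggets = [] #to store the possible combination
--     for a in range(n//6 + 1): #Iterate over possible 6-piece boxes
--         for b in range(n//9 +1): #Iterate over possible 9 pieces boxes
--             for c in range(n//22 + 1): #Iterate over possible 22 pieces boxes
--               #Checks if the current combination of boxes equals the desired quantity
--                 if 6 * a + 9 * b + 22 * c == n:
--                     total_nuggets.append((a,b,c )) #if it does add the combination to list
--
--     return total_nuggets
--
-- def find_closest_feasible_n(n):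
--     #Initialize variable to store the closest feasible value and its combinations
--     closest_n = None
--     closest_combinations = []
--
--     #Search for the closest feasible value by increasing and decreasing n
--     for offset in range(1, n + 22): #Add a margin to ensure we find the closet
--
--         #Check the next feasible value above the requested quantit
--         upper_n = n + offset
--         upper_combinations = find_nuggets_combination(upper_n)
--         if upper_combinations:
--             closest_n = upper_n
--             closest_combinations = upper_combinations
--             break
--
--         #Check the next feasible value below the requested quantity
--         lower_n = n - offset
--         if lower_n > 0 : # Ensure we donot go negative or zero
--             lower_combinations = find_nuggets_combination(lower_n)
--             if lower_combinations:
--                 closest_n = lower_n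
--                 closest_combinations = lower_combinations
--                 break
--
--     return closest_n, closest_combinations
-- ===== SOURCE B (Python) =====
-- def find_nuggets_combination_fast(m):
--     # derive c from divisibility: for each (a, b) there is at most one valid c
--     combos = []
--     for a in range(m // 6 + 1):
--         for b in range(m // 9 + 1):
--             r = m - 6 * a - 9 * b
--             if r >= 0 and r % 22 == 0:
--                 combos.append((a, b, r // 22))
--     return combos
--
-- def find_closest_feasible_n(n):
--     # Flat candidate stream in A's probe order: n+1, n-1, n+2, n-2, ...
--     # (a below-n candidate only when it is positive)
--     candidates = []
--     for offset in range(1, n + 22):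
--         candidates.append(n + offset)
--         if n - offset > 0:
--             candidates.append(n - offset)
--     for m in candidates:
--         combos = find_nuggets_combination_fast(m)
--         if combos:
--             return m, combos
--     return None, []
-- ===== Notes on version B (the rewrite author's own statement) =====
-- stated objective: faster
-- what changed: The innermost c-loop of the combination search is replaced by deriving c directly from divisibility of the remainder after the a- and b-boxes, making each candidate check quadratic instead of cubic, and the offset search is flattened into one pass over the alternating above/below candidate stream.
import Mathlib
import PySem

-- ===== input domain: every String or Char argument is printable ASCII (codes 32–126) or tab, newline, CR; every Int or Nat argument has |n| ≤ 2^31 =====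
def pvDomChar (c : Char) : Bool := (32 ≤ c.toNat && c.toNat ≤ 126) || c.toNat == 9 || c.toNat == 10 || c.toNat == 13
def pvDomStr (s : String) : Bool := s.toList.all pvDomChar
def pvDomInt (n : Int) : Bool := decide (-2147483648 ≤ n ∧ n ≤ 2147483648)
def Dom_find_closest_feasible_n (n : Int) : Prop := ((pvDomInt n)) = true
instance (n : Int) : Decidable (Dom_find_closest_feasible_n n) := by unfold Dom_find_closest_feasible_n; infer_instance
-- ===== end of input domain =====

-- B replaces A's innermost c-loop by deriving c from divisibility (one O(m^2) pass per
-- candidate instead of O(m^3)) and flattens the offset search into one candidate stream.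

-- ===== PORT A =====
-- find_nuggets_combination: triple nested loop collecting (a,b,c) with 6a+9b+22c = n
def pvNuggets (m : Int) : List (Int × Int × Int) :=
  (PySem.List.pyRange 0 (PySem.Int.floordiv m 6 + 1) 1).foldl (fun acc1 a =>
    (PySem.List.pyRange 0 (PySem.Int.floordiv m 9 + 1) 1).foldl (fun acc2 b =>
      (PySem.List.pyRange 0 (PySem.Int.floordiv m 22 + 1) 1).foldl (fun acc3 c =>
        if 6 * a + 9 * b + 22 * c = m then acc3 ++ [(a, b, c)] else acc3) acc2) acc1) []

-- A's offset loop with break: upper candidate first, then lower (if positive)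
def pvSearchA (n : Int) : List Int → Option Int × (List (Int × Int × Int))
  | [] => (none, [])
  | off :: rest =>
    let uc := pvNuggets (n + off)
    if uc ≠ [] then (some (n + off), uc)
    else if n - off > 0 then
      let lc := pvNuggets (n - off)
      if lc ≠ [] then (some (n - off), lc) else pvSearchA n rest
    else pvSearchA n rest

def find_closest_feasible_n (n : Int) : Option Int × (List (Int × Int × Int)) :=
  pvSearchA n (PySem.List.pyRange 1 (n + 22) 1)

-- ===== PORT B =====
-- find_nuggets_combination_fast: c derived from divisibility of r = m - 6a - 9b
def pvNuggetsFast (m : Int) : List (Int × Int × Int) :=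
  (PySem.List.pyRange 0 (PySem.Int.floordiv m 6 + 1) 1).foldl (fun acc1 a =>
    (PySem.List.pyRange 0 (PySem.Int.floordiv m 9 + 1) 1).foldl (fun acc2 b =>
      let r := m - 6 * a - 9 * b
      if 0 ≤ r ∧ PySem.Int.mod r 22 = 0 then acc2 ++ [(a, b, PySem.Int.floordiv r 22)]
      else acc2) acc1) []

-- the candidate stream n+1, n-1, n+2, n-2, … (below-n candidates only when positive)
def pvCandidates (n : Int) : List Int :=
  (PySem.List.pyRange 1 (n + 22) 1).foldl (fun acc off =>
    acc ++ ([n + off] ++ (if n - off > 0 then [n - off] else []))) []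

def pvFirstFeasible : List Int → Option Int × (List (Int × Int × Int))
  | [] => (none, [])
  | m :: rest =>
    let combos := pvNuggetsFast m
    if combos ≠ [] then (some m, combos) else pvFirstFeasible rest

def find_closest_feasible_n_alt (n : Int) : Option Int × (List (Int × Int × Int)) :=
  pvFirstFeasible (pvCandidates n)

-- ===== PRECONDITION & SPEC =====
def Spec_find_closest_feasible_n (n : Int) (out : Option Int × (List (Int × Int × Int))) : Prop := out = find_closest_feasible_n_alt n
instance (n : Int) (out : Option Int × (List (Int × Int × Int))) : Decidable (Spec_find_closest_feasible_n n out) := by unfold Spec_find_closest_feasible_n; infer_instance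

-- ===== CLAIM (what is proved, stated in full; the proofs are below) =====
def Claim_equal_find_closest_feasible_n : Prop := ∀ (n : Int), Dom_find_closest_feasible_n n → Spec_find_closest_feasible_n n (find_closest_feasible_n n)

-- ===== LEMMAS AND PROOFS =====

-- A's innermost c-loop, over range(0, k), collapses to at most one appended triple
theorem pv_cfold_nat (a b r : Int) (acc : List (Int × Int × Int)) (k : Nat) :
    (PySem.List.pyRange 0 (k : Int) 1).foldl (fun acc3 c =>
        if 6 * a + 9 * b + 22 * c = (6 * a + 9 * b + r) then acc3 ++ [(a, b, c)] else acc3) acc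
    = if 0 ≤ r ∧ r % 22 = 0 ∧ r < 22 * (k : Int) then acc ++ [(a, b, r / 22)] else acc := by
  induction k generalizing acc with
  | zero =>
      rw [PySem.List.pyRange_one_eq_nil (by simp)]
      simp only [List.foldl_nil]
      rw [if_neg (by push_cast; omega)]
  | succ k ih =>
      have hk : (0 : Int) ≤ (k : Int) := by positivity
      have : ((k + 1 : Nat) : Int) = (k : Int) + 1 := by push_cast; ring
      rw [this, PySem.List.pyRange_one_succ_right hk, List.foldl_append]
      rw [ih]
      simp only [List.foldl_cons, List.foldl_nil]
      by_cases h22 : 22 * (k : Int) = r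
      · rw [if_pos (by omega), if_neg (by omega), if_pos (by omega)]
        have : r / 22 = (k : Int) := by omega
        rw [this]
      · rw [if_neg (by omega)]
        by_cases hq : 0 ≤ r ∧ r % 22 = 0 ∧ r < 22 * (k : Int)
        · rw [if_pos hq, if_pos (by omega)]
        · rw [if_neg hq, if_neg (by omega)]

-- same, with an arbitrary integer upper bound
theorem pv_cfold_int (a b r : Int) (acc : List (Int × Int × Int)) (k : Int) :
    (PySem.List.pyRange 0 k 1).foldl (fun acc3 c =>
        if 6 * a + 9 * b + 22 * c = (6 * a + 9 * b + r) then acc3 ++ [(a, b, c)] else acc3) acc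
    = if 0 ≤ r ∧ r % 22 = 0 ∧ r < 22 * k then acc ++ [(a, b, r / 22)] else acc := by
  by_cases hk : k ≤ 0
  · rw [PySem.List.pyRange_one_eq_nil hk]
    simp only [List.foldl_nil]
    rw [if_neg (by omega)]
  · have : k = ((k.toNat : Nat) : Int) := by omega
    rw [this, pv_cfold_nat]

-- the two combination generators agree
theorem pv_nuggets_eq (m : Int) : pvNuggetsFast m = pvNuggets m := by
  unfold pvNuggets pvNuggetsFast
  apply PySem.List.foldl_congr_mem
  intro acc1 a ha
  apply PySem.List.foldl_congr_mem
  intro acc2 b hb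
  have ha0 : 0 ≤ a := (PySem.List.mem_pyRange_one.mp ha).1
  have hb0 : 0 ≤ b := (PySem.List.mem_pyRange_one.mp hb).1
  have hm : m = 6 * a + 9 * b + (m - 6 * a - 9 * b) := by ring
  rw [show (fun acc3 c =>
        if 6 * a + 9 * b + 22 * c = m then acc3 ++ [(a, b, c)] else acc3)
      = (fun acc3 c =>
        if 6 * a + 9 * b + 22 * c = (6 * a + 9 * b + (m - 6 * a - 9 * b)) then acc3 ++ [(a, b, c)] else acc3)
      from by rw [← hm]]
  rw [pv_cfold_int]
  set r := m - 6 * a - 9 * b with hr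
  by_cases h : 0 ≤ r ∧ PySem.Int.mod r 22 = 0
  · rw [if_pos h]
    have hmod : r % 22 = 0 := by
      rw [← PySem.Int.mod_eq_emod_of_pos (by norm_num : (0:Int) < 22)]; exact h.2
    have hdiv22 : PySem.Int.floordiv m 22 = m / 22 :=
      PySem.Int.floordiv_eq_ediv_of_pos (by norm_num)
    have hrm : r ≤ m := by omega
    rw [if_pos ⟨h.1, hmod, by rw [hdiv22] at *; omega⟩]
    rw [PySem.Int.floordiv_eq_ediv_of_pos (by norm_num : (0:Int) < 22)]
  · rw [if_neg h]
    rw [if_neg (by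
      intro hc
      exact h ⟨hc.1, by rw [PySem.Int.mod_eq_emod_of_pos (by norm_num : (0:Int) < 22)]; exact hc.2.1⟩)]

-- A's break-search over offsets equals B's single pass over the flattened candidate stream
theorem pv_search_eq (n : Int) (offs : List Int) :
    pvSearchA n offs
    = pvFirstFeasible (offs.flatMap (fun off => (n + off) :: (if n - off > 0 then [n - off] else []))) := by
  induction offs with
  | nil => rfl
  | cons off rest ih =>
      rw [List.flatMap_cons, List.cons_append]
      by_cases hpos : n - off > 0
      · simp only [pvSearchA, pvFirstFeasible, if_pos hpos, pv_nuggets_eq,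
          List.singleton_append]
        by_cases hu : pvNuggets (n + off) ≠ []
        · rw [if_pos hu, if_pos hu]
        · rw [if_neg hu, if_neg hu]
          by_cases hl : pvNuggets (n - off) ≠ []
          · rw [if_pos hl, if_pos hl]
          · rw [if_neg hl, if_neg hl, ih]
      · simp only [pvSearchA, pvFirstFeasible, if_neg hpos, List.nil_append]
        by_cases hu : pvNuggets (n + off) ≠ []
        · rw [pv_nuggets_eq, if_pos hu, if_pos hu]
        · rw [pv_nuggets_eq, if_neg hu, if_neg hu, ih]

-- ===== VERDICT (by name: the statement is the Claim_ definition above) =====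
theorem find_closest_feasible_n_spec : Claim_equal_find_closest_feasible_n := by
  intro n _
  unfold Spec_find_closest_feasible_n find_closest_feasible_n find_closest_feasible_n_alt
  rw [pv_search_eq, pvCandidates, PySem.List.foldl_append_eq_flatMap, List.nil_append]
  simp only [List.singleton_append]
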